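-- pv_equiv track=rewrite | github.com/LiteralGenie/team-planner | scripts/lib/build_tooltip_html.py | rename_tags
-- ===== SOURCE A (Python) =====
-- def rename_tags(template: str):
--     replacements = dict(
--         titleLeft=dict(tag="h1", attrs=['class="spell-name"']),
--         mainText=dict(tag="section", attrs=['class="spell-description"']),
--         TFTKeyword=dict(tag="span", attrs=['class="tft-keyword"']),
--         magicDamage=dict(tag="span", attrs=['class="magic-damage"']),
--         physicalDamage=dict(tag="span", attrs=['class="physical-damage"']),
--         scaleHealth=dict(tag="span", attrs=['class="scale-health"']),
--         rules=dict(tag="div", attrs=['class="rules"']),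
--         tftitemrules=dict(tag="div", attrs=['class="rules"']),
--         postScript=dict(tag="div", attrs=['class="post-script"']),
--     )
--
--     result = template
--     for tag, d in replacements.items():
--         open = f"<{tag}>"
--         close = f"</{tag}>"
--         attrs = " ".join(d["attrs"])
--
--         result = result.replace(open, f"<{d['tag']} {attrs}>")
--         result = result.replace(close, f"</{d['tag']}>")
--
--     return result
-- ===== SOURCE B (Python) =====
-- def rename_tags(template: str):
--     pairs = [
--         ("<titleLeft>", '<h1 class="spell-name">'),
--         ("</titleLeft>", "</h1>"),
--         ("<mainText>", '<section class="spell-description">'),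
--         ("</mainText>", "</section>"),
--         ("<TFTKeyword>", '<span class="tft-keyword">'),
--         ("</TFTKeyword>", "</span>"),
--         ("<magicDamage>", '<span class="magic-damage">'),
--         ("</magicDamage>", "</span>"),
--         ("<physicalDamage>", '<span class="physical-damage">'),
--         ("</physicalDamage>", "</span>"),
--         ("<scaleHealth>", '<span class="scale-health">'),
--         ("</scaleHealth>", "</span>"),
--         ("<rules>", '<div class="rules">'),
--         ("</rules>", "</div>"),
--         ("<tftitemrules>", '<div class="rules">'),
--         ("</tftitemrules>", "</div>"),
--         ("<postScript>", '<div class="post-script">'),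
--         ("</postScript>", "</div>"),
--     ]
--     out = []
--     i = 0
--     n = len(template)
--     while i < n:
--         for pat, rep in pairs:
--             if template.startswith(pat, i):
--                 out.append(rep)
--                 i += len(pat)
--                 break
--         else:
--             out.append(template[i])
--             i += 1
--     return "".join(out)
-- ===== Notes on version B (the rewrite author's own statement) =====
-- stated objective: alternative
-- what changed: A makes nine sequential full-string .replace passes (18 scans building intermediate strings); B builds one (pattern, replacement) table and does a single left-to-right scan over the template, emitting the replacement wherever a table pattern starts and copying the character otherwise. B is a single pass but its per-character Python loop is slower in CPython than A's C-implemented str.replace, so no speed is claimed.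
import Mathlib
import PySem

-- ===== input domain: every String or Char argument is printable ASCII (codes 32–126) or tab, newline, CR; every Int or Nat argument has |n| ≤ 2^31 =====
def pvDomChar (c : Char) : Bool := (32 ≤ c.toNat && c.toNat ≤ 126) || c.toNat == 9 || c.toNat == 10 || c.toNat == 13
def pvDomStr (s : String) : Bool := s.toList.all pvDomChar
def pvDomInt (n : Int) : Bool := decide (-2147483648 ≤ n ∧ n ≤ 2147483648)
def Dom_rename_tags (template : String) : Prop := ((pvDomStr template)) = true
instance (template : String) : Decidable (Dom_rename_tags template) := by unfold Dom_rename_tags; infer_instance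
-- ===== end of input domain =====

-- B replaces A's nine sequential full-string .replace passes by a single left-to-right
-- scan consulting one (pattern, replacement) table (objective: alternative algorithm).


-- ===== PORT A =====
-- the dict literal 'replacements'; each value dict {tag, attrs} is the pair (tag, attrs)
def renameReplacements : PySem.Dict String (String × List String) :=
  PySem.Dict.ofList
    [ ("titleLeft", ("h1", ["class=\"spell-name\""]))
    , ("mainText", ("section", ["class=\"spell-description\""]))
    , ("TFTKeyword", ("span", ["class=\"tft-keyword\""]))
    , ("magicDamage", ("span", ["class=\"magic-damage\""]))
    , ("physicalDamage", ("span", ["class=\"physical-damage\""]))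
    , ("scaleHealth", ("span", ["class=\"scale-health\""]))
    , ("rules", ("div", ["class=\"rules\""]))
    , ("tftitemrules", ("div", ["class=\"rules\""]))
    , ("postScript", ("div", ["class=\"post-script\""])) ]

def rename_tags (template : String) : String :=
  (renameReplacements.items).foldl
    (fun result td =>
      let tag := td.1
      let d := td.2
      let opn := "<" ++ tag ++ ">"
      let close := "</" ++ tag ++ ">"
      let attrs := PySem.Str.join " " d.2
      let result1 := PySem.Str.replace result opn ("<" ++ d.1 ++ " " ++ attrs ++ ">")
      PySem.Str.replace result1 close ("</" ++ d.1 ++ ">"))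
    template

-- ===== PORT B =====
-- the (pattern, replacement) table 'pairs' of Source B, as char lists
def pvPairs : List (List Char × List Char) :=
  [ ("<titleLeft>".toList, "<h1 class=\"spell-name\">".toList)
  , ("</titleLeft>".toList, "</h1>".toList)
  , ("<mainText>".toList, "<section class=\"spell-description\">".toList)
  , ("</mainText>".toList, "</section>".toList)
  , ("<TFTKeyword>".toList, "<span class=\"tft-keyword\">".toList)
  , ("</TFTKeyword>".toList, "</span>".toList)
  , ("<magicDamage>".toList, "<span class=\"magic-damage\">".toList)
  , ("</magicDamage>".toList, "</span>".toList)
  , ("<physicalDamage>".toList, "<span class=\"physical-damage\">".toList)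
  , ("</physicalDamage>".toList, "</span>".toList)
  , ("<scaleHealth>".toList, "<span class=\"scale-health\">".toList)
  , ("</scaleHealth>".toList, "</span>".toList)
  , ("<rules>".toList, "<div class=\"rules\">".toList)
  , ("</rules>".toList, "</div>".toList)
  , ("<tftitemrules>".toList, "<div class=\"rules\">".toList)
  , ("</tftitemrules>".toList, "</div>".toList)
  , ("<postScript>".toList, "<div class=\"post-script\">".toList)
  , ("</postScript>".toList, "</div>".toList) ]

-- the 'while i < n' scan of Source B: first table pattern starting here → emit replacement
-- and skip it; otherwise copy one character
def pvScanGo : List Char → List Char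
  | [] => []
  | c :: t =>
    match h : pvPairs.find? (fun pr => pr.1.isPrefixOf (c :: t)) with
    | some pr => pr.2 ++ pvScanGo ((c :: t).drop pr.1.length)
    | none => c :: pvScanGo t
termination_by l => l.length
decreasing_by
  · have hmem := List.mem_of_find?_eq_some h
    have h1 : 1 ≤ pr.1.length := by
      have : ∀ q ∈ pvPairs, 1 ≤ q.1.length := by decide
      exact this pr hmem
    simp only [List.length_drop, List.length_cons]
    omega
  · simp

def rename_tags_alt (template : String) : String :=
  String.ofList (pvScanGo template.toList)

-- ===== PRECONDITION & SPEC =====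
def Spec_rename_tags (template : String) (out : String) : Prop := out = rename_tags_alt template
instance (template : String) (out : String) : Decidable (Spec_rename_tags template out) := by unfold Spec_rename_tags; infer_instance

-- ===== CLAIM (what is proved, stated in full; the proofs are below) =====
def Claim_equal_rename_tags : Prop := ∀ (template : String), Dom_rename_tags template → Spec_rename_tags template (rename_tags template)

-- ===== LEMMAS AND PROOFS =====

-- fuelled single-pattern replace (the scan str.replace performs)
def rsimp (old new : List Char) : Nat → List Char → List Char
  | _, [] => []
  | 0, l => l
  | f + 1, c :: t =>
    if old.isPrefixOf (c :: t) then new ++ rsimp old new f ((c :: t).drop old.length)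
    else c :: rsimp old new f t

def rsimpC (old new l : List Char) : List Char := rsimp old new l.length l

-- fuelled multi-pattern scan, parametric in the table
def scanP (ps : List (List Char × List Char)) : Nat → List Char → List Char
  | _, [] => []
  | 0, l => l
  | f + 1, c :: t =>
    match ps.find? (fun pr => pr.1.isPrefixOf (c :: t)) with
    | some pr => pr.2 ++ scanP ps f ((c :: t).drop pr.1.length)
    | none => c :: scanP ps f t

def scanC (ps : List (List Char × List Char)) (l : List Char) : List Char := scanP ps l.length l

-- a mismatch inside the common length: x is then never a prefix of y ++ anything
abbrev Mis (x y : List Char) : Prop := ((x.zip y).any fun p => p.1 != p.2) = true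

-- starts with '<' and contains no further '<' (Bool form, so `decide` applies)
abbrev HeadShape (x : List Char) : Prop :=
  (x.head? == some '<' && !(x.tail.contains '<')) = true

-- x and y agree up to a first divergence at which both carry '<' (or are equal)
def AgreeLt (x y : List Char) : Prop :=
  x = y ∨ ∃ u x' y', x = u ++ '<' :: x' ∧ y = u ++ '<' :: y'

theorem headShape_ex (x : List Char) (h : HeadShape x) : ∃ t, x = '<' :: t ∧ '<' ∉ t := by
  unfold HeadShape at h
  simp only [Bool.and_eq_true, beq_iff_eq, Bool.not_eq_true'] at h
  obtain ⟨h1, h2⟩ := h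
  cases x with
  | nil => simp at h1
  | cons a t =>
    refine ⟨t, by simp_all, ?_⟩
    simp only [List.tail_cons] at h2
    simpa using h2

theorem rsimp_fuel_irrel (old new : List Char) (hold : old ≠ []) :
    ∀ (f1 f2 : Nat) (l : List Char), l.length ≤ f1 → l.length ≤ f2 →
      rsimp old new f1 l = rsimp old new f2 l := by
  intro f1
  induction f1 with
  | zero =>
    intro f2 l h1 _
    have : l = [] := by cases l <;> simp_all
    subst this; cases f2 <;> rfl
  | succ f ih =>
    intro f2 l h1 h2
    cases l with
    | nil => cases f2 <;> rfl
    | cons c t =>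
      cases f2 with
      | zero => simp at h2
      | succ g =>
        have hlen : 1 ≤ old.length := by cases old <;> simp_all
        simp only [rsimp]
        split_ifs with hp
        · rw [ih g _ (by simp at h1 ⊢; omega) (by simp at h2 ⊢; omega)]
        · rw [ih g t (by simp at h1; omega) (by simp at h2; omega)]

theorem rsimp_fuel (old new : List Char) (hold : old ≠ []) :
    ∀ (f : Nat) (l : List Char), l.length ≤ f → rsimp old new f l = rsimpC old new l :=
  fun f l h => rsimp_fuel_irrel old new hold f l.length l h le_rfl

theorem rsimpC_match (old new : List Char) (c : Char) (t : List Char)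
    (hold : old ≠ []) (h : old <+: (c :: t)) :
    rsimpC old new (c :: t) = new ++ rsimpC old new ((c :: t).drop old.length) := by
  have hlen : 1 ≤ old.length := by cases old <;> simp_all
  unfold rsimpC
  conv_lhs => rw [show (c :: t).length = t.length + 1 from by simp]
  simp only [rsimp, List.isPrefixOf_iff_prefix, h, if_true]
  rw [rsimp_fuel old new hold t.length _ (by simp; omega)]
  rfl

theorem rsimpC_nomatch (old new : List Char) (c : Char) (t : List Char)
    (h : ¬ old <+: (c :: t)) :
    rsimpC old new (c :: t) = c :: rsimpC old new t := by
  unfold rsimpC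
  conv_lhs => rw [show (c :: t).length = t.length + 1 from by simp]
  simp only [rsimp, List.isPrefixOf_iff_prefix, h, if_false]

theorem go_eq (old new : List Char) (hold : old ≠ []) :
    ∀ (f : Nat) (l acc : List Char), l.length ≤ f →
      PySem.Chars.replace.go old new f l acc = acc.reverse ++ rsimpC old new l := by
  intro f
  induction f with
  | zero =>
    intro l acc h
    have : l = [] := by cases l <;> simp_all
    subst this
    rw [PySem.Chars.replace.go.eq_def]; rfl
  | succ f ih =>
    intro l acc h
    cases l with
    | nil =>
      rw [PySem.Chars.replace.go.eq_def]
      split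
      all_goals simp_all [rsimpC, rsimp]
    | cons c t =>
      have hlen : 1 ≤ old.length := by cases old <;> simp_all
      rw [PySem.Chars.replace.go.eq_def]
      simp only []
      split_ifs with hp
      · rw [ih _ (new.reverse ++ acc) (by simp only [List.length_drop, List.length_cons] at *; omega)]
        rw [rsimpC_match old new c t hold (List.isPrefixOf_iff_prefix.mp hp)]
        simp
      · rw [ih t (c :: acc) (by simp at h ⊢; omega)]
        rw [rsimpC_nomatch old new c t (fun hc => hp (List.isPrefixOf_iff_prefix.mpr hc))]
        simp

theorem replace_eq_rsimpC (old new l : List Char) (hold : old ≠ []) :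
    PySem.Chars.replace l old new = rsimpC old new l := by
  rw [PySem.Chars.replace]
  have : old.isEmpty = false := by cases old <;> simp_all
  rw [this]
  simp only [Bool.false_eq_true, if_false]
  rw [go_eq old new hold l.length l [] le_rfl]
  rfl

theorem scanP_fuel_irrel (ps : List (List Char × List Char)) (hps : ∀ q ∈ ps, q.1 ≠ []) :
    ∀ (f1 f2 : Nat) (l : List Char), l.length ≤ f1 → l.length ≤ f2 →
      scanP ps f1 l = scanP ps f2 l := by
  intro f1
  induction f1 with
  | zero =>
    intro f2 l h1 _
    have : l = [] := by cases l <;> simp_all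
    subst this; cases f2 <;> rfl
  | succ f ih =>
    intro f2 l h1 h2
    cases l with
    | nil => cases f2 <;> rfl
    | cons c t =>
      cases f2 with
      | zero => simp at h2
      | succ g =>
        simp only [scanP]
        cases hf : ps.find? (fun pr => pr.1.isPrefixOf (c :: t)) with
        | none => dsimp only; rw [ih g t (by simp at h1; omega) (by simp at h2; omega)]
        | some q =>
          dsimp only
          have hq1 : 1 ≤ q.1.length := by
            have := List.mem_of_find?_eq_some hf
            have := hps q this
            cases hx : q.1 <;> simp_all
          rw [ih g _ (by simp at h1 ⊢; omega) (by simp at h2 ⊢; omega)]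

theorem scanP_fuel (ps : List (List Char × List Char)) (hps : ∀ q ∈ ps, q.1 ≠ []) :
    ∀ (f : Nat) (l : List Char), l.length ≤ f → scanP ps f l = scanC ps l :=
  fun f l h => scanP_fuel_irrel ps hps f l.length l h le_rfl

theorem scanC_match (ps : List (List Char × List Char)) (hps : ∀ q ∈ ps, q.1 ≠ [])
    (c : Char) (t : List Char) (q : List Char × List Char)
    (h : ps.find? (fun pr => pr.1.isPrefixOf (c :: t)) = some q) :
    scanC ps (c :: t) = q.2 ++ scanC ps ((c :: t).drop q.1.length) := by
  have hq1 : 1 ≤ q.1.length := by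
    have := hps q (List.mem_of_find?_eq_some h)
    cases hx : q.1 <;> simp_all
  unfold scanC
  conv_lhs => rw [show (c :: t).length = t.length + 1 from by simp]
  simp only [scanP, h]
  rw [scanP_fuel ps hps t.length _ (by simp; omega)]
  rfl

theorem scanC_nomatch (ps : List (List Char × List Char))
    (c : Char) (t : List Char)
    (h : ps.find? (fun pr => pr.1.isPrefixOf (c :: t)) = none) :
    scanC ps (c :: t) = c :: scanC ps t := by
  unfold scanC
  conv_lhs => rw [show (c :: t).length = t.length + 1 from by simp]
  simp only [scanP, h]

theorem scanC_nil_ps (l : List Char) : scanC [] l = l := by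
  unfold scanC
  induction hn : l.length generalizing l with
  | zero => cases l <;> simp_all [scanP]
  | succ n ih =>
    cases l with
    | nil => rfl
    | cons c t => simp only [scanP, List.find?_nil]; simp at hn; rw [ih t hn]

theorem agree_cons (c : Char) (x y : List Char) (h : AgreeLt x y) :
    AgreeLt (c :: x) (c :: y) := by
  rcases h with h | ⟨u, x', y', hx, hy⟩
  · exact Or.inl (by rw [h])
  · exact Or.inr ⟨c :: u, x', y', by simp [hx], by simp [hy]⟩

theorem prefix_lt_mono (w u x' y' : List Char) (hw : '<' ∉ w)
    (hp : w <+: u ++ '<' :: x') : w <+: u ++ '<' :: y' := by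
  induction u generalizing w with
  | nil =>
    cases w with
    | nil => simp
    | cons a wt =>
      have := (List.cons_prefix_cons.mp hp).1
      exact absurd this (by intro hh; exact hw (by simp [hh]))
  | cons c ut ih =>
    cases w with
    | nil => simp
    | cons a wt =>
      rw [List.cons_append] at hp ⊢
      rcases List.cons_prefix_cons.mp hp with ⟨hac, htl⟩
      exact List.cons_prefix_cons.mpr ⟨hac, ih wt (fun hm => hw (by simp [hm])) htl⟩

theorem agree_prefix_iff (w x y : List Char) (hw : '<' ∉ w) (h : AgreeLt x y) :
    (w <+: x ↔ w <+: y) := by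
  rcases h with h | ⟨u, x', y', hx, hy⟩
  · rw [h]
  · subst hx; subst hy
    exact ⟨prefix_lt_mono w u x' y' hw, prefix_lt_mono w u y' x' hw⟩

theorem not_prefix_of_mis (x y : List Char) (h : Mis x y) (v : List Char) :
    ¬ x <+: y ++ v := by
  revert h
  induction x generalizing y v with
  | nil => intro h; simp [Mis] at h
  | cons a xs ih =>
    intro h
    cases y with
    | nil => simp [Mis] at h
    | cons b ys =>
      simp only [Mis, List.zip_cons_cons, List.any_cons, Bool.or_eq_true, bne_iff_ne] at h
      intro hp
      rw [List.cons_append] at hp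
      rcases (List.cons_prefix_cons.mp hp) with ⟨hab, htail⟩
      rcases h with hne | hmis
      · exact hne (by simp [hab])
      · exact ih ys v hmis htail

theorem find?_congr_prefix (ps : List (List Char × List Char)) (x y : List Char)
    (h : ∀ q ∈ ps, (q.1 <+: x ↔ q.1 <+: y)) :
    ps.find? (fun pr => pr.1.isPrefixOf x) = ps.find? (fun pr => pr.1.isPrefixOf y) := by
  induction ps with
  | nil => rfl
  | cons p ps ih =>
    simp only [List.find?_cons]
    have hiff := h p (by simp)
    by_cases hp : p.1 <+: x
    · have hbx : p.1.isPrefixOf x = true := by simpa [List.isPrefixOf_iff_prefix] using hp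
      have hby : p.1.isPrefixOf y = true := by
        simpa [List.isPrefixOf_iff_prefix] using hiff.mp hp
      rw [hbx, hby]
    · have hpy : ¬ p.1 <+: y := fun hc => hp (hiff.mpr hc)
      have hbx : p.1.isPrefixOf x = false := by
        cases hb : p.1.isPrefixOf x
        · rfl
        · exact absurd (List.isPrefixOf_iff_prefix.mp hb) hp
      have hby : p.1.isPrefixOf y = false := by
        cases hb : p.1.isPrefixOf y
        · rfl
        · exact absurd (List.isPrefixOf_iff_prefix.mp hb) hpy
      rw [hbx, hby]
      exact ih (fun q hq => h q (by simp [hq]))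

theorem rsimpC_append_free (old new w v : List Char) (hw : '<' ∉ w)
    (hold : ∃ ot, old = '<' :: ot) :
    rsimpC old new (w ++ v) = w ++ rsimpC old new v := by
  obtain ⟨ot, rfl⟩ := hold
  induction w with
  | nil => rfl
  | cons c wt ih =>
    have hc : c ≠ '<' := fun hc => hw (by simp [hc])
    rw [List.cons_append, rsimpC_nomatch _ _ _ _ (fun hp => hc (List.cons_prefix_cons.mp hp).1.symm)]
    rw [ih (fun hm => hw (by simp [hm]))]
    simp

theorem scanC_append_free (ps : List (List Char × List Char))
    (hps : ∀ q ∈ ps, ∃ qt, q.1 = '<' :: qt) (w u : List Char) (hw : '<' ∉ w) :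
    scanC ps (w ++ u) = w ++ scanC ps u := by
  induction w with
  | nil => rfl
  | cons c wt ih =>
    have hc : c ≠ '<' := fun hc => hw (by simp [hc])
    have hnone : ps.find? (fun pr => pr.1.isPrefixOf (c :: (wt ++ u))) = none := by
      rw [List.find?_eq_none]
      intro q hq
      obtain ⟨qt, hq1⟩ := hps q hq
      simp only [List.isPrefixOf_iff_prefix, hq1]
      intro hpp
      exact hc (List.cons_prefix_cons.mp hpp).1.symm
    rw [List.cons_append, scanC_nomatch ps c (wt ++ u) hnone, ih (fun hm => hw (by simp [hm]))]
    simp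

theorem agree_rsimpC (old new : List Char)
    (hold : ∃ ot, old = '<' :: ot) (hnew : ∃ nt, new = '<' :: nt) :
    ∀ v, AgreeLt (rsimpC old new v) v := by
  intro v
  induction hn : v.length using Nat.strong_induction_on generalizing v with
  | _ n ih =>
  cases v with
  | nil => exact Or.inl rfl
  | cons c t =>
    by_cases hp : old <+: (c :: t)
    · obtain ⟨ot, rfl⟩ := hold
      obtain ⟨nt, rfl⟩ := hnew
      rw [rsimpC_match _ _ c t (by simp) hp]
      refine Or.inr ⟨[], nt ++ rsimpC ('<' :: ot) ('<' :: nt) ((c :: t).drop ('<' :: ot).length), t, by simp, ?_⟩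
      have : c = '<' := (List.cons_prefix_cons.mp hp).1.symm
      simp [this]
    · rw [rsimpC_nomatch _ _ c t hp]
      exact agree_cons c _ _ (ih t.length (by simp [← hn]) t rfl)

-- one pass of A's replace absorbed into the simultaneous scan
theorem main_step (pr : List Char × List Char) (ps : List (List Char × List Char))
    (hpr1 : HeadShape pr.1)
    (hpr2 : HeadShape pr.2)
    (hps0 : ∀ q ∈ ps, HeadShape q.1)
    (hmis : ∀ q ∈ ps, Mis q.1 pr.2) :
    ∀ s, scanC ps (rsimpC pr.1 pr.2 s) = scanC (pr :: ps) s := by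
  have hps : ∀ q ∈ ps, ∃ t, q.1 = '<' :: t ∧ '<' ∉ t :=
    fun q hq => headShape_ex q.1 (hps0 q hq)
  obtain ⟨pt, hpt, hptf⟩ := headShape_ex pr.1 hpr1
  obtain ⟨rt, hrt, hrtf⟩ := headShape_ex pr.2 hpr2
  have hpsne : ∀ q ∈ ps, q.1 ≠ [] := by
    intro q hq; obtain ⟨qt, hq1, _⟩ := hps q hq; simp [hq1]
  have hpsne' : ∀ q ∈ (pr :: ps), q.1 ≠ [] := by
    intro q hq
    rcases List.mem_cons.mp hq with rfl | hq'
    · simp [hpt]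
    · exact hpsne q hq'
  have hpshead : ∀ q ∈ ps, ∃ qt, q.1 = '<' :: qt := by
    intro q hq; obtain ⟨qt, hq1, _⟩ := hps q hq; exact ⟨qt, hq1⟩
  intro s
  induction hn : s.length using Nat.strong_induction_on generalizing s with
  | _ n ih =>
  cases s with
  | nil => rfl
  | cons c t =>
    by_cases hp : pr.1 <+: (c :: t)
    · -- A's pattern matches here; both sides emit pr.2 and skip it
      rw [rsimpC_match pr.1 pr.2 c t (by simp [hpt]) hp]
      set X := rsimpC pr.1 pr.2 ((c :: t).drop pr.1.length) with hX
      have hnone : ps.find? (fun q => q.1.isPrefixOf (pr.2 ++ X)) = none := by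
        rw [List.find?_eq_none]
        intro q hq
        have := not_prefix_of_mis q.1 pr.2 (hmis q hq) X
        simp [List.isPrefixOf_iff_prefix]
        exact this
      have h1 : scanC ps (pr.2 ++ X) = '<' :: scanC ps (rt ++ X) := by
        rw [hrt, List.cons_append]
        exact scanC_nomatch ps '<' (rt ++ X) (by rw [← List.cons_append, ← hrt]; exact hnone)
      have h2 : scanC ps (rt ++ X) = rt ++ scanC ps X := scanC_append_free ps hpshead rt X hrtf
      have h3 : scanC ps X = scanC (pr :: ps) ((c :: t).drop pr.1.length) := by
        apply ih ((c :: t).drop pr.1.length).length _ _ rfl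
        have : 1 ≤ pr.1.length := by simp [hpt]
        simp only [List.length_drop, List.length_cons, ← hn]
        simp at hn ⊢; omega
      have hfind : (pr :: ps).find? (fun q => q.1.isPrefixOf (c :: t)) = some pr := by
        simp only [List.find?_cons]
        rw [show pr.1.isPrefixOf (c :: t) = true from by
          simp [List.isPrefixOf_iff_prefix, hp]]
      rw [h1, h2, h3, scanC_match (pr :: ps) hpsne' c t pr hfind, hrt, List.cons_append]
    · -- A's pattern does not match here
      rw [rsimpC_nomatch pr.1 pr.2 c t hp]
      have hagree := agree_rsimpC pr.1 pr.2 ⟨pt, hpt⟩ ⟨rt, hrt⟩ t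
      have hcongr : ∀ q ∈ ps, (q.1 <+: (c :: rsimpC pr.1 pr.2 t) ↔ q.1 <+: (c :: t)) := by
        intro q hq
        obtain ⟨qt, hq1, hqf⟩ := hps q hq
        rw [hq1, List.cons_prefix_cons, List.cons_prefix_cons,
            agree_prefix_iff qt _ _ hqf hagree]
      have hfind := find?_congr_prefix ps (c :: rsimpC pr.1 pr.2 t) (c :: t) hcongr
      cases hfq : ps.find? (fun q => q.1.isPrefixOf (c :: t)) with
      | none =>
        rw [scanC_nomatch ps c _ (hfind.trans hfq)]
        have hrest : scanC ps (rsimpC pr.1 pr.2 t) = scanC (pr :: ps) t := by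
          apply ih t.length _ t rfl
          simp [← hn]
        have hfind' : (pr :: ps).find? (fun q => q.1.isPrefixOf (c :: t)) = none := by
          simp only [List.find?_cons]
          rw [show pr.1.isPrefixOf (c :: t) = false from by
            cases hb : pr.1.isPrefixOf (c :: t)
            · rfl
            · exact absurd (List.isPrefixOf_iff_prefix.mp hb) hp]
          exact hfq
        rw [scanC_nomatch (pr :: ps) c t hfind', hrest]
      | some q =>
        have hqmem := List.mem_of_find?_eq_some hfq
        obtain ⟨qt, hq1, hqf⟩ := hps q hqmem
        have hqpre : q.1 <+: (c :: t) := by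
          have := List.find?_some hfq
          simpa [List.isPrefixOf_iff_prefix] using this
        obtain ⟨v, hv⟩ := hqpre
        have hc : c = '<' := by
          rw [hq1] at hv
          cases hv
          rfl
        have ht : t = qt ++ v := by
          rw [hq1] at hv
          cases hv
          rfl
        have hlist : c :: rsimpC pr.1 pr.2 t = q.1 ++ rsimpC pr.1 pr.2 v := by
          rw [ht, rsimpC_append_free pr.1 pr.2 qt v hqf ⟨pt, hpt⟩, hq1, hc, List.cons_append]
        have hfq' : ps.find? (fun q' => q'.1.isPrefixOf (c :: rsimpC pr.1 pr.2 t)) = some q :=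
          hfind.trans hfq
        have hstep : scanC ps (c :: rsimpC pr.1 pr.2 t)
            = q.2 ++ scanC ps ((c :: rsimpC pr.1 pr.2 t).drop q.1.length) :=
          scanC_match ps hpsne c _ q hfq'
        have hdrop : (c :: rsimpC pr.1 pr.2 t).drop q.1.length = rsimpC pr.1 pr.2 v := by
          rw [hlist, List.drop_left]
        have hih : scanC ps (rsimpC pr.1 pr.2 v) = scanC (pr :: ps) v := by
          apply ih v.length _ v rfl
          have : 1 ≤ q.1.length := by simp [hq1]
          have hlv : (c :: t).length = q.1.length + v.length := by
            rw [← hv]; simp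
          simp only [← hn]
          simp at hlv ⊢; omega
        have hfind'' : (pr :: ps).find? (fun q' => q'.1.isPrefixOf (c :: t)) = some q := by
          simp only [List.find?_cons]
          rw [show pr.1.isPrefixOf (c :: t) = false from by
            cases hb : pr.1.isPrefixOf (c :: t)
            · rfl
            · exact absurd (List.isPrefixOf_iff_prefix.mp hb) hp]
          exact hfq
        have hdrop2 : (c :: t).drop q.1.length = v := by
          conv_lhs => rw [← hv]
          rw [List.drop_left]
        rw [hstep, hdrop, hih, scanC_match (pr :: ps) hpsne' c t q hfind'', hdrop2]

theorem main_step' (o n : List Char) (ps : List (List Char × List Char))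
    (hpr1 : HeadShape o) (hpr2 : HeadShape n)
    (hps0 : ∀ q ∈ ps, HeadShape q.1) (hmis : ∀ q ∈ ps, Mis q.1 n) :
    ∀ s, scanC ps (rsimpC o n s) = scanC ((o, n) :: ps) s :=
  main_step (o, n) ps hpr1 hpr2 hps0 hmis

theorem pvScanGo_eq_scanC (l : List Char) : pvScanGo l = scanC pvPairs l := by
  have hne : ∀ q ∈ pvPairs, q.1 ≠ [] := by decide
  induction hn : l.length using Nat.strong_induction_on generalizing l with
  | _ n ih =>
  cases l with
  | nil => simp [pvScanGo, scanC, scanP]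
  | cons c t =>
    rw [pvScanGo]
    cases hf : pvPairs.find? (fun pr => pr.1.isPrefixOf (c :: t)) with
    | none =>
      rw [scanC_nomatch pvPairs c t hf]
      exact congrArg _ (ih t.length (by simp [← hn]) t rfl)
    | some q =>
      rw [scanC_match pvPairs hne c t q hf]
      have hq1 : 1 ≤ q.1.length := by
        have := hne q (List.mem_of_find?_eq_some hf)
        cases hx : q.1 <;> simp_all
      refine congrArg _ (ih ((c :: t).drop q.1.length).length ?_ _ rfl)
      simp only [List.length_drop, List.length_cons, ← hn]
      simp at hn ⊢; omega

theorem hA (t : String) : (rename_tags t).toList =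
    pvPairs.foldl (fun acc pr => PySem.Chars.replace acc pr.1 pr.2) t.toList := by
  have hi : renameReplacements.items =
    [ ("titleLeft", ("h1", ["class=\"spell-name\""]))
    , ("mainText", ("section", ["class=\"spell-description\""]))
    , ("TFTKeyword", ("span", ["class=\"tft-keyword\""]))
    , ("magicDamage", ("span", ["class=\"magic-damage\""]))
    , ("physicalDamage", ("span", ["class=\"physical-damage\""]))
    , ("scaleHealth", ("span", ["class=\"scale-health\""]))
    , ("rules", ("div", ["class=\"rules\""]))
    , ("tftitemrules", ("div", ["class=\"rules\""]))
    , ("postScript", ("div", ["class=\"post-script\""])) ] := by decide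
  simp only [rename_tags, hi, pvPairs, List.foldl]
  simp only [PySem.Str.toList_replace]
  rfl

theorem fold_to_rsimp (t : List Char) :
    pvPairs.foldl (fun acc pr => PySem.Chars.replace acc pr.1 pr.2) t
      = pvPairs.foldl (fun acc pr => rsimpC pr.1 pr.2 acc) t := by
  have hne : ∀ q ∈ pvPairs, q.1 ≠ [] := by decide
  simp only [pvPairs, List.foldl] at hne ⊢
  rw [replace_eq_rsimpC _ _ _ (by decide)]
  repeat rw [replace_eq_rsimpC _ _ _ (by decide)]

theorem scan_absorb (t : List Char) :
    scanC [] (pvPairs.foldl (fun acc pr => rsimpC pr.1 pr.2 acc) t) = scanC pvPairs t := by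
  simp only [pvPairs, List.foldl]
  rw [main_step' "</postScript>".toList "</div>".toList [] (by decide) (by decide) (by decide) (by decide)]
  rw [main_step' "<postScript>".toList "<div class=\"post-script\">".toList [("</postScript>".toList, "</div>".toList)] (by decide) (by decide) (by decide) (by decide)]
  rw [main_step' "</tftitemrules>".toList "</div>".toList [("<postScript>".toList, "<div class=\"post-script\">".toList), ("</postScript>".toList, "</div>".toList)] (by decide) (by decide) (by decide) (by decide)]
  rw [main_step' "<tftitemrules>".toList "<div class=\"rules\">".toList [("</tftitemrules>".toList, "</div>".toList), ("<postScript>".toList, "<div class=\"post-script\">".toList), ("</postScript>".toList, "</div>".toList)] (by decide) (by decide) (by decide) (by decide)]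
  rw [main_step' "</rules>".toList "</div>".toList [("<tftitemrules>".toList, "<div class=\"rules\">".toList), ("</tftitemrules>".toList, "</div>".toList), ("<postScript>".toList, "<div class=\"post-script\">".toList), ("</postScript>".toList, "</div>".toList)] (by decide) (by decide) (by decide) (by decide)]
  rw [main_step' "<rules>".toList "<div class=\"rules\">".toList [("</rules>".toList, "</div>".toList), ("<tftitemrules>".toList, "<div class=\"rules\">".toList), ("</tftitemrules>".toList, "</div>".toList), ("<postScript>".toList, "<div class=\"post-script\">".toList), ("</postScript>".toList, "</div>".toList)] (by decide) (by decide) (by decide) (by decide)]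
  rw [main_step' "</scaleHealth>".toList "</span>".toList [("<rules>".toList, "<div class=\"rules\">".toList), ("</rules>".toList, "</div>".toList), ("<tftitemrules>".toList, "<div class=\"rules\">".toList), ("</tftitemrules>".toList, "</div>".toList), ("<postScript>".toList, "<div class=\"post-script\">".toList), ("</postScript>".toList, "</div>".toList)] (by decide) (by decide) (by decide) (by decide)]
  rw [main_step' "<scaleHealth>".toList "<span class=\"scale-health\">".toList [("</scaleHealth>".toList, "</span>".toList), ("<rules>".toList, "<div class=\"rules\">".toList), ("</rules>".toList, "</div>".toList), ("<tftitemrules>".toList, "<div class=\"rules\">".toList), ("</tftitemrules>".toList, "</div>".toList), ("<postScript>".toList, "<div class=\"post-script\">".toList), ("</postScript>".toList, "</div>".toList)] (by decide) (by decide) (by decide) (by decide)]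
  rw [main_step' "</physicalDamage>".toList "</span>".toList [("<scaleHealth>".toList, "<span class=\"scale-health\">".toList), ("</scaleHealth>".toList, "</span>".toList), ("<rules>".toList, "<div class=\"rules\">".toList), ("</rules>".toList, "</div>".toList), ("<tftitemrules>".toList, "<div class=\"rules\">".toList), ("</tftitemrules>".toList, "</div>".toList), ("<postScript>".toList, "<div class=\"post-script\">".toList), ("</postScript>".toList, "</div>".toList)] (by decide) (by decide) (by decide) (by decide)]
  rw [main_step' "<physicalDamage>".toList "<span class=\"physical-damage\">".toList [("</physicalDamage>".toList, "</span>".toList), ("<scaleHealth>".toList, "<span class=\"scale-health\">".toList), ("</scaleHealth>".toList, "</span>".toList), ("<rules>".toList, "<div class=\"rules\">".toList), ("</rules>".toList, "</div>".toList), ("<tftitemrules>".toList, "<div class=\"rules\">".toList), ("</tftitemrules>".toList, "</div>".toList), ("<postScript>".toList, "<div class=\"post-script\">".toList), ("</postScript>".toList, "</div>".toList)] (by decide) (by decide) (by decide) (by decide)]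
  rw [main_step' "</magicDamage>".toList "</span>".toList [("<physicalDamage>".toList, "<span class=\"physical-damage\">".toList), ("</physicalDamage>".toList, "</span>".toList), ("<scaleHealth>".toList, "<span class=\"scale-health\">".toList), ("</scaleHealth>".toList, "</span>".toList), ("<rules>".toList, "<div class=\"rules\">".toList), ("</rules>".toList, "</div>".toList), ("<tftitemrules>".toList, "<div class=\"rules\">".toList), ("</tftitemrules>".toList, "</div>".toList), ("<postScript>".toList, "<div class=\"post-script\">".toList), ("</postScript>".toList, "</div>".toList)] (by decide) (by decide) (by decide) (by decide)]
  rw [main_step' "<magicDamage>".toList "<span class=\"magic-damage\">".toList [("</magicDamage>".toList, "</span>".toList), ("<physicalDamage>".toList, "<span class=\"physical-damage\">".toList), ("</physicalDamage>".toList, "</span>".toList), ("<scaleHealth>".toList, "<span class=\"scale-health\">".toList), ("</scaleHealth>".toList, "</span>".toList), ("<rules>".toList, "<div class=\"rules\">".toList), ("</rules>".toList, "</div>".toList), ("<tftitemrules>".toList, "<div class=\"rules\">".toList), ("</tftitemrules>".toList, "</div>".toList), ("<postScript>".toList, "<div class=\"post-script\">".toList), ("</postScript>".toList, "</div>".toList)]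 (by decide) (by decide) (by decide) (by decide)]
  rw [main_step' "</TFTKeyword>".toList "</span>".toList [("<magicDamage>".toList, "<span class=\"magic-damage\">".toList), ("</magicDamage>".toList, "</span>".toList), ("<physicalDamage>".toList, "<span class=\"physical-damage\">".toList), ("</physicalDamage>".toList, "</span>".toList), ("<scaleHealth>".toList, "<span class=\"scale-health\">".toList), ("</scaleHealth>".toList, "</span>".toList), ("<rules>".toList, "<div class=\"rules\">".toList), ("</rules>".toList, "</div>".toList), ("<tftitemrules>".toList, "<div class=\"rules\">".toList), ("</tftitemrules>".toList, "</div>".toList), ("<postScript>".toList, "<div class=\"post-script\">".toList), ("</postScript>".toList, "</div>".toList)] (by decide) (by decide) (by decide) (by decide)]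
  rw [main_step' "<TFTKeyword>".toList "<span class=\"tft-keyword\">".toList [("</TFTKeyword>".toList, "</span>".toList), ("<magicDamage>".toList, "<span class=\"magic-damage\">".toList), ("</magicDamage>".toList, "</span>".toList), ("<physicalDamage>".toList, "<span class=\"physical-damage\">".toList), ("</physicalDamage>".toList, "</span>".toList), ("<scaleHealth>".toList, "<span class=\"scale-health\">".toList), ("</scaleHealth>".toList, "</span>".toList), ("<rules>".toList, "<div class=\"rules\">".toList), ("</rules>".toList, "</div>".toList), ("<tftitemrules>".toList, "<div class=\"rules\">".toList), ("</tftitemrules>".toList, "</div>".toList), ("<postScript>".toList, "<div class=\"post-script\">".toList), ("</postScript>".toList, "</div>".toList)] (by decide) (by decide) (by decide) (by decide)]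
  rw [main_step' "</mainText>".toList "</section>".toList [("<TFTKeyword>".toList, "<span class=\"tft-keyword\">".toList), ("</TFTKeyword>".toList, "</span>".toList), ("<magicDamage>".toList, "<span class=\"magic-damage\">".toList), ("</magicDamage>".toList, "</span>".toList), ("<physicalDamage>".toList, "<span class=\"physical-damage\">".toList), ("</physicalDamage>".toList, "</span>".toList), ("<scaleHealth>".toList, "<span class=\"scale-health\">".toList), ("</scaleHealth>".toList, "</span>".toList), ("<rules>".toList, "<div class=\"rules\">".toList), ("</rules>".toList, "</div>".toList), ("<tftitemrules>".toList, "<div class=\"rules\">".toList), ("</tftitemrules>".toList, "</div>".toList), ("<postScript>".toList, "<div class=\"post-script\">".toList), ("</postScript>".toList, "</div>".toList)] (by decide) (by decide) (by decide) (by decide)]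
  rw [main_step' "<mainText>".toList "<section class=\"spell-description\">".toList [("</mainText>".toList, "</section>".toList), ("<TFTKeyword>".toList, "<span class=\"tft-keyword\">".toList), ("</TFTKeyword>".toList, "</span>".toList), ("<magicDamage>".toList, "<span class=\"magic-damage\">".toList), ("</magicDamage>".toList, "</span>".toList), ("<physicalDamage>".toList, "<span class=\"physical-damage\">".toList), ("</physicalDamage>".toList, "</span>".toList), ("<scaleHealth>".toList, "<span class=\"scale-health\">".toList), ("</scaleHealth>".toList, "</span>".toList), ("<rules>".toList, "<div class=\"rules\">".toList), ("</rules>".toList, "</div>".toList), ("<tftitemrules>".toList, "<div class=\"rules\">".toList), ("</tftitemrules>".toList, "</div>".toList), ("<postScript>".toList, "<div class=\"post-script\">".toList), ("</postScript>".toList, "</div>".toList)] (by decide) (by decide) (by decide) (by decide)]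
  rw [main_step' "</titleLeft>".toList "</h1>".toList [("<mainText>".toList, "<section class=\"spell-description\">".toList), ("</mainText>".toList, "</section>".toList), ("<TFTKeyword>".toList, "<span class=\"tft-keyword\">".toList), ("</TFTKeyword>".toList, "</span>".toList), ("<magicDamage>".toList, "<span class=\"magic-damage\">".toList), ("</magicDamage>".toList, "</span>".toList), ("<physicalDamage>".toList, "<span class=\"physical-damage\">".toList), ("</physicalDamage>".toList, "</span>".toList), ("<scaleHealth>".toList, "<span class=\"scale-health\">".toList), ("</scaleHealth>".toList, "</span>".toList), ("<rules>".toList, "<div class=\"rules\">".toList), ("</rules>".toList, "</div>".toList), ("<tftitemrules>".toList, "<div class=\"rules\">".toList), ("</tftitemrules>".toList, "</div>".toList), ("<postScript>".toList, "<div class=\"post-script\">".toList), ("</postScript>".toList, "</div>".toList)] (by decide) (by decide) (by decide) (by decide)]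
  rw [main_step' "<titleLeft>".toList "<h1 class=\"spell-name\">".toList [("</titleLeft>".toList, "</h1>".toList), ("<mainText>".toList, "<section class=\"spell-description\">".toList), ("</mainText>".toList, "</section>".toList), ("<TFTKeyword>".toList, "<span class=\"tft-keyword\">".toList), ("</TFTKeyword>".toList, "</span>".toList), ("<magicDamage>".toList, "<span class=\"magic-damage\">".toList), ("</magicDamage>".toList, "</span>".toList), ("<physicalDamage>".toList, "<span class=\"physical-damage\">".toList), ("</physicalDamage>".toList, "</span>".toList), ("<scaleHealth>".toList, "<span class=\"scale-health\">".toList), ("</scaleHealth>".toList, "</span>".toList), ("<rules>".toList, "<div class=\"rules\">".toList), ("</rules>".toList, "</div>".toList), ("<tftitemrules>".toList, "<div class=\"rules\">".toList), ("</tftitemrules>".toList, "</div>".toList), ("<postScript>".toList, "<div class=\"post-script\">".toList), ("</postScript>".toList, "</div>".toList)] (by decide) (by decide) (by decide) (by decide)]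

theorem rename_tags_toList (template : String) :
    (rename_tags template).toList = pvScanGo template.toList := by
  rw [pvScanGo_eq_scanC, hA, fold_to_rsimp, ← scan_absorb, scanC_nil_ps]

-- ===== VERDICT (by name: the statement is the Claim_ definition above) =====
theorem rename_tags_spec : Claim_equal_rename_tags := by
  intro template _
  unfold Spec_rename_tags rename_tags_alt
  rw [← String.ofList_toList (s := rename_tags template), rename_tags_toList]
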